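-- pv_equiv track=rewrite | github.com/soumya2k4nathen/gryffindors-1-SUSTAIN-AI-THON | backend/diary_processor.py | group_linked_sentences
-- ===== SOURCE A (Python) =====
-- def group_linked_sentences(text):
--     linking_words = {"this", "that", "these", "those", "it", "such"}
--     sentences = text.split(". ")  # Simplified for this example
--     grouped_sentences = []
--     current_group = []
--
--     for sentence in sentences:
--         sentence_text = sentence.strip()
--
--         if any(sentence_text.lower().startswith(word) for word in linking_words):
--             current_group.append(sentence_text)
--         else:
--             if current_group:
--                 grouped_sentences.append(" ".join(current_group))
--             current_group = [sentence_text]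
--
--     if current_group:
--         grouped_sentences.append(" ".join(current_group))
--
--     return grouped_sentences
-- ===== SOURCE B (Python) =====
-- def group_linked_sentences(text):
--     # Two-pointer scan over pre-stripped sentences: each group starts at a
--     # sentence that does not begin (case-insensitively) with a linking word;
--     # the inner scan extends the group over following linking sentences.
--     words = ("this", "that", "these", "those", "it", "such")
--     ss = [s.strip() for s in text.split(". ")]
--     groups = []
--     i, n = 0, len(ss)
--     while i < n:
--         j = i + 1
--         while j < n and ss[j].lower().startswith(words):
--             j += 1
--         groups.append(" ".join(ss[i:j]))
--         i = j
--     return groups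
-- ===== Notes on version B (the rewrite author's own statement) =====
-- stated objective: simpler
-- what changed: Replaces A's accumulator machine (current_group list with conditional flushes inside and after the loop) by a two-pointer scan over the pre-stripped sentence list: each group is the slice from a non-linking sentence up to the next one, joined directly; no flush logic or trailing-group special case.
import Mathlib
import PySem

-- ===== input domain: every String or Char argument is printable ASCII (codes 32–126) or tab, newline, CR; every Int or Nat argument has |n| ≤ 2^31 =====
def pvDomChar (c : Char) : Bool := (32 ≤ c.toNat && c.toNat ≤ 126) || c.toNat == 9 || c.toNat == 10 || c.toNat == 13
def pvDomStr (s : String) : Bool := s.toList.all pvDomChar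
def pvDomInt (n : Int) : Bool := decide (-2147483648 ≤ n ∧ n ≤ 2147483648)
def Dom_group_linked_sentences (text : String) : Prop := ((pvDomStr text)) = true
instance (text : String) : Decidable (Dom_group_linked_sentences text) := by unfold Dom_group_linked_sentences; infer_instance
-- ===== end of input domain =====

-- B replaces A's accumulator/flush loop by a two-pointer group scan over the pre-stripped
-- sentences (objective: simpler); proved to return the same list on every input.


-- ===== PORT A =====
-- `any(sentence_text.lower().startswith(word) for word in linking_words)`: a disjunction of
-- pure prefix tests over the 6-word set, order-insensitive, written as a fixed `||`-chain.
def pvIsLink (t : List Char) : Bool :=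
  let l := PySem.Chars.lower t
  PySem.Chars.startswith l "this".toList || PySem.Chars.startswith l "that".toList ||
  PySem.Chars.startswith l "these".toList || PySem.Chars.startswith l "those".toList ||
  PySem.Chars.startswith l "it".toList || PySem.Chars.startswith l "such".toList

-- one loop iteration of A, on the already-stripped sentence_text `t`
def pvStepA (st : List (List Char) × List (List Char)) (t : List Char) :
    List (List Char) × List (List Char) :=
  if pvIsLink t then (st.1, st.2 ++ [t])
  else ((if st.2 ≠ [] then st.1 ++ [PySem.Chars.join [' '] st.2] else st.1), [t])

def group_linked_sentences (text : String) : List String :=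
  let sentences := PySem.Chars.splitOn text.toList ". ".toList
  let r := sentences.foldl (fun st sentence => pvStepA st (PySem.Chars.strip sentence)) ([], [])
  let grouped := if r.2 ≠ [] then r.1 ++ [PySem.Chars.join [' '] r.2] else r.1
  grouped.map String.ofList

-- ===== PORT B =====
-- Source B's outer while-loop: one group per step, starting at ss[i]; the inner `j` scan over
-- following linking sentences is the takeWhile, `i = j` is the dropWhile (exact).
def pvGroupsB : List (List Char) → List (List Char)
  | [] => []
  | s :: rest =>
      PySem.Chars.join [' '] (s :: rest.takeWhile pvIsLink) :: pvGroupsB (rest.dropWhile pvIsLink)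
  termination_by l => l.length
  decreasing_by simpa using Nat.lt_succ_of_le (List.length_dropWhile_le _ _)

def group_linked_sentences_alt (text : String) : List String :=
  let ss := (PySem.Chars.splitOn text.toList ". ".toList).map PySem.Chars.strip
  (pvGroupsB ss).map String.ofList

-- ===== PRECONDITION & SPEC =====
def Spec_group_linked_sentences (text : String) (out : List String) : Prop := out = group_linked_sentences_alt text
instance (text : String) (out : List String) : Decidable (Spec_group_linked_sentences text out) := by unfold Spec_group_linked_sentences; infer_instance

-- ===== CLAIM (what is proved, stated in full; the proofs are below) =====
def Claim_equal_group_linked_sentences : Prop := ∀ (text : String), Dom_group_linked_sentences text → Spec_group_linked_sentences text (group_linked_sentences text)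

-- ===== LEMMAS AND PROOFS =====

-- A's loop from a nonempty current group `cur`: it emits `cur` extended by the following run
-- of linking sentences, then behaves like B's group scan on the remainder.
lemma pvFold_stepA (ss : List (List Char)) (grouped cur : List (List Char)) (h : cur ≠ []) :
    (if (ss.foldl pvStepA (grouped, cur)).2 ≠ [] then
       (ss.foldl pvStepA (grouped, cur)).1 ++ [PySem.Chars.join [' '] (ss.foldl pvStepA (grouped, cur)).2]
     else (ss.foldl pvStepA (grouped, cur)).1)
    = grouped ++ (PySem.Chars.join [' '] (cur ++ ss.takeWhile pvIsLink)
        :: pvGroupsB (ss.dropWhile pvIsLink)) := by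
  induction ss generalizing grouped cur with
  | nil => simp [pvGroupsB, h]
  | cons s rest ih =>
      by_cases hs : pvIsLink s
      · simpa [pvStepA, hs, List.append_assoc] using ih grouped (cur ++ [s]) (by simp)
      · simp only [List.foldl_cons, pvStepA, hs, if_neg, Bool.false_eq_true, h,
          ne_eq, not_false_iff, if_true, List.takeWhile_cons_of_neg, List.dropWhile_cons_of_neg,
          List.append_nil]
        rw [ih (grouped ++ [PySem.Chars.join [' '] cur]) [s] (by simp)]
        simp [pvGroupsB]

-- A's whole loop (started with empty accumulator and empty current group) computes B's groups.
lemma pvFold_eq_groupsB (ss : List (List Char)) :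
    (if (ss.foldl pvStepA ([], [])).2 ≠ [] then
       (ss.foldl pvStepA ([], [])).1 ++ [PySem.Chars.join [' '] (ss.foldl pvStepA ([], [])).2]
     else (ss.foldl pvStepA ([], [])).1)
    = pvGroupsB ss := by
  cases ss with
  | nil => simp [pvGroupsB]
  | cons s rest =>
      have hfirst : pvStepA ([], []) s = ([], [s]) := by
        by_cases hs : pvIsLink s <;> simp [pvStepA, hs]
      simp only [List.foldl_cons, hfirst]
      rw [pvFold_stepA rest [] [s] (by simp)]
      simp [pvGroupsB]

-- ===== VERDICT (by name: the statement is the Claim_ definition above) =====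
theorem group_linked_sentences_spec : Claim_equal_group_linked_sentences := by
  intro text _
  unfold Spec_group_linked_sentences group_linked_sentences group_linked_sentences_alt
  simp only [← List.foldl_map, pvFold_eq_groupsB]
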